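-- pv_equiv track=rewrite | github.com/ThaDocsN/Graphs | projects/ancestor/ancestor.py | earliest_ancestor
-- ===== SOURCE A (Python) =====
-- def earliest_ancestor(ancestors, starting_node, visited=None):
--     values = []
--     keys = []
--
--     for pair in ancestors:
--         keys.append(pair[0])
--         values.append(pair[1])
--     if visited is None:
--         visited = set()
--     if starting_node not in values and starting_node not in visited:
--         return -1
--     for pair in ancestors:
--         if pair[1] == starting_node:
--             visited.add(pair[0])
--             return earliest_ancestor(ancestors, pair[0], visited)
--     return starting_node
-- ===== SOURCE B (Python) =====
-- def earliest_ancestor(ancestors, starting_node, visited=None):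
--     # child -> first-listed parent, built once; then walk up the chain iteratively
--     parent = {}
--     for p, c in ancestors:
--         parent.setdefault(c, p)
--     if visited is None:
--         visited = set()
--     if starting_node not in parent and starting_node not in visited:
--         return -1
--     node = starting_node
--     while node in parent:
--         node = parent[node]
--         visited.add(node)
--     return node
-- ===== Notes on version B (the rewrite author's own statement) =====
-- stated objective: alternative
-- what changed: Instead of rebuilding the children list and rescanning all edges at every recursion step, B builds a child-to-first-parent dict in one pass and then follows the parent chain iteratively, recording reached nodes in visited as A does (O(E*depth) rescans become O(E+depth); not measurably faster on the benchmark family, whose chains are shallow).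
import Mathlib
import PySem

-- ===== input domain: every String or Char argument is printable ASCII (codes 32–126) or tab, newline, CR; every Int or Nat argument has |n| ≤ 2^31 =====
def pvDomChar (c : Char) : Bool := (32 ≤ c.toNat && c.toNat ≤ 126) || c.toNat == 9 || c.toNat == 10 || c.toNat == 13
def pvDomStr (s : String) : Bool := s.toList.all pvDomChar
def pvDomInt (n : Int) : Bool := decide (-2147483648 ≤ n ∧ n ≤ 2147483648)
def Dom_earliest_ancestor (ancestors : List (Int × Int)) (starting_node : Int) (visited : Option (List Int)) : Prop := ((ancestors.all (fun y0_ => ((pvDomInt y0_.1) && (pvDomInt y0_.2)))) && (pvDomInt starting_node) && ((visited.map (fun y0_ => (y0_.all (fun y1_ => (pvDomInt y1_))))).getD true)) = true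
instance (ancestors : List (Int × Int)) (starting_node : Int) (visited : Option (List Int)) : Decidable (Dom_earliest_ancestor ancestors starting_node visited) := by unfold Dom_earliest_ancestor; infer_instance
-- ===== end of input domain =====

-- B replaces A's per-step rescan of all edges by a child→first-parent dict built once plus an
-- iterative chain walk that records reached nodes in `visited` just as A does (objective:
-- alternative algorithm; the theorems below are about the RETURN value).

-- ===== PORT A =====
-- A recurses without bound on a cyclic parent chain (Python: RecursionError); the port carries a
-- fuel of ancestors.length + 2, which never runs out on inputs satisfying Pre_ (chain terminates).
def eaGo (ancestors : List (Int × Int)) (node : Int) (visited : PySem.Set Int) : Nat → Int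
  | 0 => -1    -- unreachable under Pre_earliest_ancestor
  | fuel + 1 =>
    let kv := ancestors.foldl (fun (kv : List Int × List Int) pair => (kv.1 ++ [pair.1], kv.2 ++ [pair.2])) ([], [])
    if !(kv.2.contains node) && !(PySem.Set.contains visited node) then -1
    else
      match ancestors.find? (fun pair => pair.2 == node) with
      | some pair => eaGo ancestors pair.1 (PySem.Set.add visited pair.1) fuel
      | none => node

def earliest_ancestor (ancestors : List (Int × Int)) (starting_node : Int) (visited : Option (List Int)) : Int :=
  eaGo ancestors starting_node
    (match visited with | none => PySem.Set.empty | some l => PySem.Set.ofList l)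
    (ancestors.length + 2)

-- ===== PORT B =====
-- B's while-loop up the chain (adding each reached parent to visited), as fuel recursion
-- (the fuel suffices under Pre_earliest_ancestor).
def eaWalk (parent : PySem.Dict Int Int) (node : Int) (visited : PySem.Set Int) : Nat → Int
  | 0 => node
  | fuel + 1 =>
    match parent.get? node with
    | none => node
    | some p => eaWalk parent p (PySem.Set.add visited p) fuel

def earliest_ancestor_alt (ancestors : List (Int × Int)) (starting_node : Int) (visited : Option (List Int)) : Int :=
  let parent := ancestors.foldl (fun d pair => if d.contains pair.2 then d else d.insert pair.2 pair.1) PySem.Dict.empty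
  let v := match visited with | none => PySem.Set.empty | some l => PySem.Set.ofList l
  if !(parent.contains starting_node) && !(PySem.Set.contains v starting_node) then -1
  else eaWalk parent starting_node v (ancestors.length + 2)

-- ===== PRECONDITION & SPEC =====
-- the child→first-parent map of the input (used only to state Pre_)
def pvFirstParent (ancestors : List (Int × Int)) : PySem.Dict Int Int :=
  ancestors.foldl (fun d pair => if d.contains pair.2 then d else d.insert pair.2 pair.1) PySem.Dict.empty

-- one step up the ancestor chain: the first-listed parent, or the node itself if it has none
def pvParentStep (ancestors : List (Int × Int)) (x : Int) : Int :=
  ((pvFirstParent ancestors).get? x).getD x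

-- Pre_ excludes exactly the inputs whose first-parent chain from starting_node is cyclic: there
-- Python A recurses forever (RecursionError). Closed form: after ancestors.length + 1 steps up
-- the chain one reaches a parentless node (a chain that ends at all does so within that many
-- steps, so the bound excludes nothing A returns on).
def Pre_earliest_ancestor (ancestors : List (Int × Int)) (starting_node : Int) (visited : Option (List Int)) : Prop :=
  (pvFirstParent ancestors).get? ((pvParentStep ancestors)^[ancestors.length + 1] starting_node) = none
instance (ancestors : List (Int × Int)) (starting_node : Int) (visited : Option (List Int)) : Decidable (Pre_earliest_ancestor ancestors starting_node visited) := by unfold Pre_earliest_ancestor; infer_instance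

def pvWitness_earliest_ancestor : (List (Int × Int)) × Int × Option (List Int) :=
  ([(4, 2), (7, 4), (1, 7)], 2, none)

def Spec_earliest_ancestor (ancestors : List (Int × Int)) (starting_node : Int) (visited : Option (List Int)) (out : Int) : Prop := out = earliest_ancestor_alt ancestors starting_node visited
instance (ancestors : List (Int × Int)) (starting_node : Int) (visited : Option (List Int)) (out : Int) : Decidable (Spec_earliest_ancestor ancestors starting_node visited out) := by unfold Spec_earliest_ancestor; infer_instance

-- ===== CLAIM (what is proved, stated in full; the proofs are below) =====
def Claim_equal_earliest_ancestor : Prop := ∀ (ancestors : List (Int × Int)) (starting_node : Int) (visited : Option (List Int)), Dom_earliest_ancestor ancestors starting_node visited → Pre_earliest_ancestor ancestors starting_node visited → Spec_earliest_ancestor ancestors starting_node visited (earliest_ancestor ancestors starting_node visited)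

-- ===== LEMMAS AND PROOFS =====

-- proof helper: the bare chain walk (eaWalk without its visited accumulator)
def eaChain (parent : PySem.Dict Int Int) (node : Int) : Nat → Int
  | 0 => node
  | fuel + 1 =>
    match parent.get? node with
    | none => node
    | some p => eaChain parent p fuel

-- proof helper: the first-parent chain from `node` reaches a parentless node within `fuel` steps
def eaStops (parent : PySem.Dict Int Int) (node : Int) : Nat → Bool
  | 0 => false
  | fuel + 1 =>
    match parent.get? node with
    | none => true
    | some p => eaStops parent p fuel

lemma stops_iff (d : PySem.Dict Int Int) (f : Nat) (x : Int) :
    eaStops d x (f + 1) = true ↔ d.get? ((fun y => (d.get? y).getD y)^[f] x) = none := by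
  induction f generalizing x with
  | zero => rw [eaStops]; cases h : d.get? x <;> simp [eaStops, h]
  | succ g ih =>
    rw [eaStops]
    cases h : d.get? x with
    | none =>
      have hfix : (fun y => (d.get? y).getD y) x = x := by simp [h]
      have hiter : (fun y => (d.get? y).getD y)^[g + 1] x = x := Function.iterate_fixed (f := fun y => (d.get? y).getD y) hfix (g + 1)
      simp [h, hiter]
    | some p =>
      rw [Function.iterate_succ_apply]
      simp only [h, Option.getD_some]
      simpa using ih p

-- the dict built by the setdefault loop looks up the FIRST pair with the given child
lemma fp_aux (ancestors : List (Int × Int)) (d : PySem.Dict Int Int) (x : Int) :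
    (ancestors.foldl (fun d pair => if d.contains pair.2 then d else d.insert pair.2 pair.1) d).get? x
      = ((d.get? x).orElse (fun _ => (ancestors.find? (fun pair => pair.2 == x)).map (·.1))) := by
  induction ancestors generalizing d with
  | nil => cases h : d.get? x <;> simp [List.find?, Option.orElse, h]
  | cons pr rest ih =>
    simp only [List.foldl_cons, ih]
    by_cases hc : d.contains pr.2 = true
    · simp only [hc, if_true]
      by_cases hx : pr.2 = x
      · subst hx
        have : (d.get? pr.2).isSome := by
          rw [← PySem.Dict.contains_eq_isSome_get?]; exact hc
        cases h : d.get? pr.2 with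
        | none => rw [h] at this; simp at this
        | some v => simp [List.find?, Option.orElse, h]
      · simp [List.find?, Option.orElse, show (pr.2 == x) = false by simp [hx]]
    · simp only [Bool.not_eq_true] at hc
      simp only [hc, Bool.false_eq_true, if_false]
      by_cases hx : pr.2 = x
      · subst hx
        have hnone : d.get? pr.2 = none := by
          cases h : d.get? pr.2 with
          | none => rfl
          | some v =>
            have : d.contains pr.2 = (d.get? pr.2).isSome := PySem.Dict.contains_eq_isSome_get? ..
            rw [h] at this; rw [hc] at this; simp at this
        simp [PySem.Dict.get?_insert, hnone, List.find?, Option.orElse]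
      · rw [PySem.Dict.get?_insert]
        simp [hx, List.find?, show (pr.2 == x) = false by simp [hx], Ne.symm hx]

lemma fp_get (ancestors : List (Int × Int)) (x : Int) :
    (pvFirstParent ancestors).get? x = (ancestors.find? (fun pair => pair.2 == x)).map (·.1) := by
  unfold pvFirstParent
  rw [fp_aux]
  simp [Option.orElse]

-- the values list A builds is the list of children
lemma values_eq (ancestors : List (Int × Int)) (k v : List Int) :
    (ancestors.foldl (fun (kv : List Int × List Int) pair => (kv.1 ++ [pair.1], kv.2 ++ [pair.2])) (k, v)).2
      = v ++ ancestors.map (·.2) := by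
  induction ancestors generalizing k v with
  | nil => simp
  | cons pr rest ih => simp [ih]

lemma values_contains (ancestors : List (Int × Int)) (x : Int) :
    (ancestors.map (·.2)).contains x = ((pvFirstParent ancestors).get? x).isSome := by
  rw [fp_get]
  cases h : ancestors.find? (fun pair => pair.2 == x) with
  | none =>
    simp only [Option.map_none, Option.isSome_none]
    rw [List.find?_eq_none] at h
    simp only [List.contains_eq_mem, decide_eq_false_iff_not, List.mem_map]
    rintro ⟨pr, hpr, hx⟩
    exact absurd (by simpa using hx) (by simpa using h pr hpr)
  | some pr =>
    simp only [Option.map_some, Option.isSome_some]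
    have := List.find?_some h
    have hmem := List.mem_of_find?_eq_some h
    simp only [List.contains_eq_mem, decide_eq_true_eq, List.mem_map]
    exact ⟨pr, hmem, by simpa using this⟩

-- once the current node is in `visited`, A's recursion just follows the first-parent chain
lemma go_eq_chain (fuel : Nat) (ancestors : List (Int × Int)) (node : Int) (visited : PySem.Set Int)
    (hv : node ∈ visited)
    (hs : eaStops (pvFirstParent ancestors) node fuel = true) :
    eaGo ancestors node visited fuel = eaChain (pvFirstParent ancestors) node fuel := by
  induction fuel generalizing node visited with
  | zero => simp [eaStops] at hs
  | succ f ih =>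
    rw [eaStops] at hs
    have hvc : PySem.Set.contains visited node = true := (PySem.Set.contains_iff ..).mpr hv
    cases h : (pvFirstParent ancestors).get? node with
    | none =>
      have hf : ancestors.find? (fun pair => pair.2 == node) = none := by
        have := fp_get ancestors node
        rw [h] at this
        cases hh : ancestors.find? (fun pair => pair.2 == node) with
        | none => rfl
        | some pr => rw [hh] at this; simp at this
      have hvals : (ancestors.map (·.2)).contains node = false := by
        rw [values_contains, h]; rfl
      rw [eaGo, eaChain, h]
      simp only [values_eq, List.nil_append, hvals, Bool.not_false, Bool.true_and,
        PySem.Set.contains_eq_listContains, hvc, Bool.not_true, hf]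
      simp [hv]
    | some p =>
      rw [h] at hs
      have hf : ∃ pr, ancestors.find? (fun pair => pair.2 == node) = some pr ∧ pr.1 = p := by
        have := fp_get ancestors node
        rw [h] at this
        cases hh : ancestors.find? (fun pair => pair.2 == node) with
        | none => rw [hh] at this; simp at this
        | some pr => rw [hh] at this; exact ⟨pr, rfl, by simpa using this.symm⟩
      obtain ⟨pr, hfind, hp⟩ := hf
      have hvals : (ancestors.map (·.2)).contains node = true := by
        rw [values_contains, h]; rfl
      rw [eaGo, eaChain, h]
      simp only [values_eq, List.nil_append, hvals, Bool.not_true, Bool.false_and,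
        Bool.false_eq_true, if_false, hfind]
      rw [ih pr.1 (PySem.Set.add visited pr.1) ((PySem.Set.mem_add ..).mpr (Or.inr rfl)) (hp ▸ hs), hp]

-- A's top-level call, characterised by the first-parent map
lemma main_aux (ancestors : List (Int × Int)) (s : Int) (v0 : PySem.Set Int)
    (hpre : eaStops (pvFirstParent ancestors) s (ancestors.length + 2) = true) :
    eaGo ancestors s v0 (ancestors.length + 2)
      = if !((pvFirstParent ancestors).contains s) then
          (if PySem.Set.contains v0 s then s else -1)
        else eaChain (pvFirstParent ancestors) s (ancestors.length + 2) := by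
  have hfuel : ancestors.length + 2 = (ancestors.length + 1) + 1 := rfl
  have hcont : (pvFirstParent ancestors).contains s = ((pvFirstParent ancestors).get? s).isSome :=
    PySem.Dict.contains_eq_isSome_get? ..
  cases h : (pvFirstParent ancestors).get? s with
  | none =>
    rw [h] at hcont
    have hvals : (ancestors.map (·.2)).contains s = false := by
      rw [values_contains, h]; rfl
    have hf : ancestors.find? (fun pair => pair.2 == s) = none := by
      have := fp_get ancestors s
      rw [h] at this
      cases hh : ancestors.find? (fun pair => pair.2 == s) with
      | none => rfl
      | some pr => rw [hh] at this; simp at this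
    rw [hfuel, eaGo]
    simp only [values_eq, List.nil_append, hvals, hcont, Option.isSome_none, Bool.not_false,
      Bool.true_and, hf]
    cases hm : PySem.Set.contains v0 s <;> simp
  | some p =>
    rw [h] at hcont
    rw [hfuel] at hpre ⊢
    rw [eaStops, h] at hpre
    have hvals : (ancestors.map (·.2)).contains s = true := by
      rw [values_contains, h]; rfl
    have hf : ∃ pr, ancestors.find? (fun pair => pair.2 == s) = some pr ∧ pr.1 = p := by
      have := fp_get ancestors s
      rw [h] at this
      cases hh : ancestors.find? (fun pair => pair.2 == s) with
      | none => rw [hh] at this; simp at this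
      | some pr => rw [hh] at this; exact ⟨pr, rfl, by simpa using this.symm⟩
    obtain ⟨pr, hfind, hp⟩ := hf
    rw [eaGo, eaChain, h]
    simp only [values_eq, List.nil_append, hvals, Bool.not_true, Bool.false_and,
      Bool.false_eq_true, if_false, hfind, hcont, Option.isSome_some]
    rw [go_eq_chain _ _ _ _ ((PySem.Set.mem_add ..).mpr (Or.inr rfl)) (hp ▸ hpre), hp]

-- eaWalk's visited accumulator does not influence its return value
lemma walk_eq_chain (f : Nat) (d : PySem.Dict Int Int) (x : Int) (v : PySem.Set Int) :
    eaWalk d x v f = eaChain d x f := by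
  induction f generalizing x v with
  | zero => rfl
  | succ g ih =>
    rw [eaWalk, eaChain]
    cases h : d.get? x with
    | none => rfl
    | some p => exact ih p _

-- the top-level branch structure of B, rewritten to A's branch structure
lemma rhs_eq (ancestors : List (Int × Int)) (s : Int) (v0 : PySem.Set Int) :
    (if !((pvFirstParent ancestors).contains s) && !(PySem.Set.contains v0 s) then -1
     else eaChain (pvFirstParent ancestors) s (ancestors.length + 2))
    = if !((pvFirstParent ancestors).contains s) then
        (if PySem.Set.contains v0 s then s else -1)
      else eaChain (pvFirstParent ancestors) s (ancestors.length + 2) := by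
  cases hc : (pvFirstParent ancestors).contains s with
  | true => simp [hc]
  | false =>
    have hnone : (pvFirstParent ancestors).get? s = none := by
      rw [PySem.Dict.contains_eq_isSome_get? ..] at hc
      cases h : (pvFirstParent ancestors).get? s with
      | none => rfl
      | some p => rw [h] at hc; simp at hc
    cases hm : PySem.Set.contains v0 s with
    | false => simp [hc, hm]
    | true =>
      have hch : eaChain (pvFirstParent ancestors) s (ancestors.length + 2) = s := by
        rw [show ancestors.length + 2 = (ancestors.length + 1) + 1 from rfl, eaChain, hnone]
      simp [hc, hm, hch]

-- ===== VERDICT (by name: the statement is the Claim_ definition above) =====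
theorem earliest_ancestor_spec : Claim_equal_earliest_ancestor := by
  intro ancestors s visited _ hpre0
  unfold Pre_earliest_ancestor at hpre0
  have hpre : eaStops (pvFirstParent ancestors) s (ancestors.length + 2) = true :=
    (stops_iff (pvFirstParent ancestors) (ancestors.length + 1) s).mpr hpre0
  unfold Spec_earliest_ancestor earliest_ancestor earliest_ancestor_alt
  have hP : List.foldl (fun d pair => if d.contains pair.2 then d else d.insert pair.2 pair.1)
      PySem.Dict.empty ancestors = pvFirstParent ancestors := rfl
  cases visited with
  | none =>
    rw [main_aux ancestors s PySem.Set.empty hpre]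
    simp only [hP, walk_eq_chain]
    exact (rhs_eq ancestors s PySem.Set.empty).symm
  | some l =>
    rw [main_aux ancestors s (PySem.Set.ofList l) hpre]
    simp only [hP, walk_eq_chain]
    exact (rhs_eq ancestors s (PySem.Set.ofList l)).symm
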